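-- pv_equiv track=rewrite | github.com/Lauragpse/Pratica-Python | decodificando.py | cripto
-- ===== SOURCE A (Python) =====
-- def cripto(sub):
--   codigo = ""
--   for letra in sub:
--     if letra in "Aa":
--       codigo = codigo + "@"
--     elif letra in "Oo":
--       codigo = codigo + "*"
--     else:
--       codigo  = codigo + letra
--   return codigo
-- ===== SOURCE B (Python) =====
-- def cripto(sub):
--   for old, new in (("A", "@"), ("a", "@"), ("O", "*"), ("o", "*")):
--     sub = sub.replace(old, new)
--   return sub
-- ===== Notes on version B (the rewrite author's own statement) =====
-- stated objective: alternative
-- what changed: Replaces the single character-by-character loop with if/elif branches and a growing accumulator by four staged whole-string str.replace passes, one per source letter; correct because the substituted target characters never match a later pass's source letter.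
import Mathlib
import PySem

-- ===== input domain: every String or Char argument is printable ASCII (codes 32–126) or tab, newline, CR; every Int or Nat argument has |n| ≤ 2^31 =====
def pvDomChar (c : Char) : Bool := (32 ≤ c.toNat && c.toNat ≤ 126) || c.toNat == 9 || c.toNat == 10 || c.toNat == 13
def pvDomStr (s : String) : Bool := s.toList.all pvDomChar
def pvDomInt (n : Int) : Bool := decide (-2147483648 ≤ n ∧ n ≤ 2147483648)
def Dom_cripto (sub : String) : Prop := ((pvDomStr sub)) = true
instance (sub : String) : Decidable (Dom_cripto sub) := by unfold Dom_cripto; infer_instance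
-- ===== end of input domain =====

-- B replaces A's single character-by-character loop (accumulator + if/elif branches) by four
-- staged whole-string str.replace passes, one per source letter (alternative decomposition).

-- ===== PORT A =====
-- A: loop over the letters, appending '@' / '*' / the letter to the accumulator string
-- (accumulator kept as List Char; Lean's own String.append is opaque to the kernel).
def cripto (sub : String) : String :=
  String.ofList
    (sub.toList.foldl
      (fun codigo letra =>
        if PySem.Chars.isIn [letra] "Aa".toList then codigo ++ ['@']
        else if PySem.Chars.isIn [letra] "Oo".toList then codigo ++ ['*']
        else codigo ++ [letra])
      [])

-- ===== PORT B =====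
-- B: fold over the four (old, new) pairs, each step one whole-string str.replace pass.
def cripto_alt (sub : String) : String :=
  [("A", "@"), ("a", "@"), ("O", "*"), ("o", "*")].foldl
    (fun s p => PySem.Str.replace s p.1 p.2) sub

-- ===== PRECONDITION & SPEC =====
def Spec_cripto (sub : String) (out : String) : Prop := out = cripto_alt sub
instance (sub : String) (out : String) : Decidable (Spec_cripto sub out) := by unfold Spec_cripto; infer_instance

-- ===== CLAIM =====
def Claim_equal_cripto : Prop := ∀ (sub : String), Dom_cripto sub → Spec_cripto sub (cripto sub)

-- ===== LEMMAS AND PROOFS =====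

-- Single-character replace is a map over the characters.
lemma replace_go_single (x d : Char) :
    ∀ (fuel : Nat) (l acc : List Char), l.length ≤ fuel →
      PySem.Chars.replace.go [x] [d] fuel l acc
        = acc.reverse ++ l.map (fun c => if c = x then d else c) := by
  intro fuel
  induction fuel with
  | zero =>
    intro l acc h
    have : l = [] := List.eq_nil_of_length_eq_zero (Nat.le_zero.mp h)
    subst this
    rw [PySem.Chars.replace.go.eq_def]
    simp
  | succ n ih =>
    intro l acc h
    cases l with
    | nil => rw [PySem.Chars.replace.go.eq_def]; simp
    | cons c t =>
      rw [PySem.Chars.replace.go.eq_def]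
      simp only [List.length_cons, Nat.succ_le_succ_iff] at h
      by_cases hx : c = x
      · subst hx
        simp only [List.isPrefixOf, BEq.rfl, Bool.true_and,
          if_pos, List.length_singleton, List.drop_succ_cons, List.drop_zero]
        rw [ih t _ h]
        simp
      · have hpre : [x].isPrefixOf (c :: t) = false := by
          simp [List.isPrefixOf, Ne.symm hx]
        simp only [hpre, Bool.false_eq_true, if_false]
        rw [ih t _ h]
        simp [hx]

lemma replace_single (x d : Char) (s : List Char) :
    PySem.Chars.replace s [x] [d] = s.map (fun c => if c = x then d else c) := by
  unfold PySem.Chars.replace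
  rw [replace_go_single x d s.length s [] (le_refl _)]
  simp

-- Loop invariant: A's fold from any accumulator appends the per-character translation.
lemma cripto_foldl (l : List Char) (acc : List Char) :
    l.foldl
      (fun codigo letra =>
        if PySem.Chars.isIn [letra] "Aa".toList then codigo ++ ['@']
        else if PySem.Chars.isIn [letra] "Oo".toList then codigo ++ ['*']
        else codigo ++ [letra])
      acc
    = acc ++ l.map (fun c =>
        if PySem.Chars.isIn [c] "Aa".toList then '@'
        else if PySem.Chars.isIn [c] "Oo".toList then '*'
        else c) := by
  induction l generalizing acc with
  | nil => simp
  | cons c cs ih =>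
    simp only [List.foldl_cons, List.map_cons]
    rw [ih]
    split_ifs <;> simp

-- The four staged single-character substitutions compose to A's per-character branch.
lemma char_comp (c : Char) :
    (if (if (if (if c = 'A' then '@' else c) = 'a' then '@'
          else if c = 'A' then '@' else c) = 'O' then '*'
        else if (if c = 'A' then '@' else c) = 'a' then '@'
        else if c = 'A' then '@' else c) = 'o' then '*'
      else if (if (if c = 'A' then '@' else c) = 'a' then '@'
          else if c = 'A' then '@' else c) = 'O' then '*'
        else if (if c = 'A' then '@' else c) = 'a' then '@'
        else if c = 'A' then '@' else c)
    = (if PySem.Chars.isIn [c] "Aa".toList then '@'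
       else if PySem.Chars.isIn [c] "Oo".toList then '*'
       else c) := by
  by_cases hA : c = 'A'; · subst hA; decide
  by_cases ha : c = 'a'; · subst ha; decide
  by_cases hO : c = 'O'; · subst hO; decide
  by_cases ho : c = 'o'; · subst ho; decide
  have h1 : PySem.Chars.isIn [c] ['A', 'a'] = false := by
    rw [PySem.Chars.isIn_eq_false_iff]
    intro h
    have := List.singleton_sublist.mp h.sublist
    simp_all
  have h2 : PySem.Chars.isIn [c] ['O', 'o'] = false := by
    rw [PySem.Chars.isIn_eq_false_iff]
    intro h
    have := List.singleton_sublist.mp h.sublist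
    simp_all
  simp [show ("Aa" : String).toList = ['A', 'a'] from rfl,
    show ("Oo" : String).toList = ['O', 'o'] from rfl, hA, ha, hO, ho, h1, h2]

-- ===== VERDICT =====
theorem cripto_spec : Claim_equal_cripto := by
  intro sub _
  unfold Spec_cripto cripto cripto_alt
  rw [cripto_foldl]
  simp only [List.foldl_cons, List.foldl_nil]
  apply String.ext
  simp only [PySem.Str.toList_replace, String.toList_ofList]
  rw [show ("A" : String).toList = ['A'] from rfl, show ("@" : String).toList = ['@'] from rfl,
      show ("a" : String).toList = ['a'] from rfl, show ("O" : String).toList = ['O'] from rfl,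
      show ("o" : String).toList = ['o'] from rfl, show ("*" : String).toList = ['*'] from rfl]
  rw [replace_single, replace_single, replace_single, replace_single]
  simp only [List.map_map, List.nil_append]
  exact (List.map_congr_left (fun c _ => (char_comp c))).symm
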